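-- pv_equiv track=rewrite | github.com/gmacgre/advent_of_code_2015 | 13/13-1.py | getPointVal
-- ===== SOURCE A (Python) =====
-- def getPointVal(config, points):
--     toRet = 0
--     for i in range(len(config)):
--         sitter = config[i]
--         next = config[(i+1)%len(config)]
--         prev = config[(i-1)%len(config)]
--         toRet += points[sitter][next] + points[sitter][prev]
--     return toRet
-- ===== SOURCE B (Python) =====
-- def getPointVal(config, points):
--     # Pass 1: count each directed adjacency (a, b) of the circular arrangement.
--     cnt = {}
--     for a, b in zip(config, config[1:] + config[:1]):
--         cnt[(a, b)] = cnt.get((a, b), 0) + 1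
--         cnt[(b, a)] = cnt.get((b, a), 0) + 1
--     # Pass 2: one matrix lookup per DISTINCT directed adjacency, weighted by multiplicity.
--     total = 0
--     for (a, b), m in cnt.items():
--         total += points[a][b] * m
--     return total
-- ===== Notes on version B (the rewrite author's own statement) =====
-- stated objective: alternative
-- what changed: B replaces A's per-sitter loop with modular next/prev indexing by a two-pass scheme: first aggregate the directed adjacencies of the circle into a hash counter, then do one points[a][b] lookup per distinct directed adjacency, weighted by its multiplicity.
import Mathlib
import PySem

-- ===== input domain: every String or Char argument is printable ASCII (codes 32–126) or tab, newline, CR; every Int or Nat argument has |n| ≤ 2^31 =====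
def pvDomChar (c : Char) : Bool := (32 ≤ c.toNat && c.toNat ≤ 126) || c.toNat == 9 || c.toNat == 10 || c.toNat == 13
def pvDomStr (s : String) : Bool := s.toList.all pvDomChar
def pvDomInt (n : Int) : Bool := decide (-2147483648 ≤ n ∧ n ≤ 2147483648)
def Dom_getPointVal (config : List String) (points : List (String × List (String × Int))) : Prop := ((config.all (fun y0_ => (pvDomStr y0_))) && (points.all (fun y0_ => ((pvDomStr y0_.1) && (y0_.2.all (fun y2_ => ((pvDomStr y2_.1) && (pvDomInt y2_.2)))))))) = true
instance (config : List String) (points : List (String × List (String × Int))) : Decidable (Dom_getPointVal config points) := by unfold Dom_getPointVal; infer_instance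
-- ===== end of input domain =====

-- B counts each directed adjacency of the circle into a hash map, then does ONE matrix
-- lookup per DISTINCT directed adjacency weighted by its multiplicity — instead of A's
-- per-sitter loop with modular next/prev indexing ('alternative', same order of cost).

-- ===== PORT A =====
-- points[a][b]: nested dict lookup; the 'none' branches are where Python raises KeyError,
-- excluded by Pre_getPointVal.
def edgeVal (points : List (String × List (String × Int))) (a b : String) : Int :=
  match (PySem.Dict.mk points).get? a with
  | some d =>
    match (PySem.Dict.mk d).get? b with
    | some v => v
    | none => 0
  | none => 0

def getPointVal (config : List String) (points : List (String × List (String × Int))) : Int :=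
  (PySem.List.pyRange 0 (PySem.List.len config) 1).foldl
    (fun toRet i =>
      let sitter := PySem.List.pyGetD config i ""
      let next := PySem.List.pyGetD config (PySem.Int.mod (i + 1) (PySem.List.len config)) ""
      let prev := PySem.List.pyGetD config (PySem.Int.mod (i - 1) (PySem.List.len config)) ""
      toRet + (edgeVal points sitter next + edgeVal points sitter prev)) 0

-- ===== PORT B =====
def getPointVal_alt (config : List String) (points : List (String × List (String × Int))) : Int :=
  let cnt :=
    (config.zip (PySem.List.slice config (some 1) none ++ PySem.List.slice config none (some 1))).foldl
      (fun d p =>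
        let d := d.insert (p.1, p.2) (d.getD (p.1, p.2) 0 + 1)
        d.insert (p.2, p.1) (d.getD (p.2, p.1) 0 + 1))
      PySem.Dict.empty
  cnt.items.foldl (fun total km => total + edgeVal points km.1.1 km.1.2 * km.2) 0

-- ===== PRECONDITION & SPEC =====
-- whether points[a][b] exists (used only by Pre_)
def pvHasEdge (points : List (String × List (String × Int))) (a b : String) : Bool :=
  match (PySem.Dict.mk points).get? a with
  | some d => ((PySem.Dict.mk d).get? b).isSome
  | none => false

-- Pre_ excludes exactly the inputs on which Python A raises KeyError: some directed
-- adjacent pair (a,b) of the circular arrangement has no entry points[a][b]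
-- (Python B raises KeyError on exactly the same inputs).
def Pre_getPointVal (config : List String) (points : List (String × List (String × Int))) : Prop :=
  ∀ p ∈ config.zip (PySem.List.slice config (some 1) none ++ PySem.List.slice config none (some 1)),
    pvHasEdge points p.1 p.2 = true ∧ pvHasEdge points p.2 p.1 = true
instance (config : List String) (points : List (String × List (String × Int))) : Decidable (Pre_getPointVal config points) := by unfold Pre_getPointVal; infer_instance

def pvWitness_getPointVal : List String × (List (String × List (String × Int))) :=
  (["a", "b"], [("a", [("b", 1)]), ("b", [("a", 2)])])

def Spec_getPointVal (config : List String) (points : List (String × List (String × Int))) (out : Int) : Prop := out = getPointVal_alt config points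
instance (config : List String) (points : List (String × List (String × Int))) (out : Int) : Decidable (Spec_getPointVal config points out) := by unfold Spec_getPointVal; infer_instance

-- ===== CLAIM (what is proved, stated in full; the proofs are below) =====
def Claim_equal_getPointVal : Prop := ∀ (config : List String) (points : List (String × List (String × Int))), Dom_getPointVal config points → Pre_getPointVal config points → Spec_getPointVal config points (getPointVal config points)

-- ===== LEMMAS AND PROOFS =====

-- the circle's adjacent (this, next) pairs, and the multiset of directed adjacencies
def pvLp (config : List String) : List (String × String) :=
  config.zip (config.drop 1 ++ config.take 1)
def pvL (config : List String) : List (String × String) :=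
  (pvLp config).flatMap (fun p => [(p.1, p.2), (p.2, p.1)])

theorem pvLp_slice (config : List String) :
    config.zip (PySem.List.slice config (some 1) none ++ PySem.List.slice config none (some 1))
      = pvLp config := by
  rw [PySem.List.slice_from config (by norm_num), PySem.List.slice_to config (by norm_num)]
  rfl

-- the zipped rotation, element by element: pairs (config[k], config[(k+1) % n])
theorem zip_rot (l : List String) :
    l.zip (l.drop 1 ++ l.take 1) =
      (List.range l.length).map
        (fun k => (l.getD k "", l.getD ((k + 1) % l.length) "")) := by
  rcases Nat.eq_zero_or_pos l.length with hn | hn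
  · rw [List.length_eq_zero_iff.mp hn]; simp
  have hgd : ∀ j (hj : j < l.length), l.getD j "" = l[j] := by
    intro j hj; rw [List.getD_eq_getElem?_getD, List.getElem?_eq_getElem hj]; rfl
  apply List.ext_getElem
  · simp; omega
  intro i h1 h2
  have hi : i < l.length := by simp at h1; omega
  rw [List.getElem_zip, List.getElem_map, List.getElem_range]
  refine Prod.ext ?_ ?_ <;> simp only []
  · rw [hgd i hi]
  by_cases hlast : i + 1 = l.length
  · have hm : (i + 1) % l.length = 0 := by rw [hlast, Nat.mod_self]
    rw [hm, hgd 0 hn, List.getElem_append_right (by simp; omega)]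
    simp only [List.getElem_take]
    congr 1
    simp
    omega
  · have hm : (i + 1) % l.length = i + 1 := Nat.mod_eq_of_lt (by omega)
    rw [hm, hgd (i + 1) (by omega), List.getElem_append_left (by simp; omega)]
    simp

theorem mod_next (n k : Nat) :
    PySem.Int.mod ((k:Int) + 1) (n:Int) = (((k + 1) % n : Nat) : Int) := by
  have h : ((k:Int) + 1) = ((k + 1 : Nat) : Int) := by push_cast; ring
  rw [h, PySem.Int.mod_natCast]

theorem mod_prev (n k : Nat) (hn : 0 < n) :
    PySem.Int.mod ((k:Int) - 1) (n:Int) = (((k + n - 1) % n : Nat) : Int) := by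
  have h1 : ((k:Int) - 1) = ((k + n - 1 : Nat) : Int) - (n:Int) := by
    push_cast [Nat.cast_sub (by omega : 1 ≤ k + n)]; ring
  rw [h1, PySem.Int.mod_eq_emod_of_pos (by exact_mod_cast hn), Int.sub_emod_right]
  exact_mod_cast Int.ofNat_mod_ofNat (k + n - 1) n

-- A as a sum over indices: edges to the next and to the previous sitter
theorem A_norm (config : List String) (points : List (String × List (String × Int)))
    (hn : 0 < config.length) :
    getPointVal config points =
      ((List.range config.length).map
        (fun k => edgeVal points (config.getD k "") (config.getD ((k + 1) % config.length) "")
                + edgeVal points (config.getD k "") (config.getD ((k + config.length - 1) % config.length) ""))).sum := by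
  unfold getPointVal
  rw [PySem.List.len_eq, PySem.List.pyRange_one, List.foldl_map, PySem.List.foldl_add]
  simp only [Int.sub_zero, Int.toNat_natCast, zero_add]
  congr 1
  apply List.map_congr_left
  intro k hk
  rw [mod_next, mod_prev _ _ hn]
  simp only [PySem.List.pyGetD_natCast]

theorem pv_nx (n k : Nat) (hk : k < n) : ((k + 1) % n + n - 1) % n = k := by
  by_cases h : k + 1 = n
  · rw [h, Nat.mod_self, Nat.zero_add, Nat.mod_eq_of_lt (by omega)]
    omega
  · have h1 : (k + 1) % n = k + 1 := Nat.mod_eq_of_lt (by omega)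
    have h2 : k + 1 + n - 1 = k + n := by omega
    rw [h1, h2, Nat.add_mod_right, Nat.mod_eq_of_lt hk]

theorem list_sum_range_eq (n : Nat) (f : Nat → Int) :
    ((List.range n).map f).sum = ∑ i ∈ Finset.range n, f i := rfl

-- summing h over the rotation i ↦ (i+1) % n is summing h
theorem shift_sum (n : Nat) (h : Nat → Int) :
    ∑ i ∈ Finset.range n, h ((i + 1) % n) = ∑ i ∈ Finset.range n, h i := by
  rcases n with _ | m
  · simp
  rw [← Fin.sum_univ_eq_sum_range (fun i => h ((i + 1) % (m+1))) (m+1),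
      ← Fin.sum_univ_eq_sum_range h (m+1)]
  refine Fintype.sum_equiv (Equiv.addRight (1 : Fin (m+1))) _ _ ?_
  intro x
  congr 1
  simp [Equiv.addRight, Fin.add_def, Nat.add_mod]

-- the multiset of directed adjacencies, summed through edgeVal, as the same index sum
theorem S_norm (config : List String) (points : List (String × List (String × Int))) :
    ((pvL config).map (fun x => edgeVal points x.1 x.2)).sum =
      ((List.range config.length).map
        (fun k => edgeVal points (config.getD k "") (config.getD ((k + 1) % config.length) "")
                + edgeVal points (config.getD ((k + 1) % config.length) "") (config.getD k ""))).sum := by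
  unfold pvL
  rw [List.map_flatMap, List.flatMap_def, List.sum_flatten, List.map_map]
  rw [show ((pvLp config).map (List.sum ∘ fun a => List.map (fun x => edgeVal points x.1 x.2) [(a.1, a.2), (a.2, a.1)]))
        = (pvLp config).map (fun p => edgeVal points p.1 p.2 + edgeVal points p.2 p.1) from by
      apply List.map_congr_left; intro p _; simp]
  rw [pvLp, zip_rot, List.map_map]
  rfl

-- A equals the directed-adjacency multiset sum
theorem A_eq_S (config : List String) (points : List (String × List (String × Int))) :
    getPointVal config points = ((pvL config).map (fun x => edgeVal points x.1 x.2)).sum := by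
  rcases Nat.eq_zero_or_pos config.length with hn | hn
  · rw [List.length_eq_zero_iff.mp hn]; rfl
  rw [A_norm _ _ hn, S_norm, list_sum_range_eq, list_sum_range_eq,
      Finset.sum_add_distrib, Finset.sum_add_distrib]
  congr 1
  rw [← shift_sum config.length
        (fun j => edgeVal points (config.getD j "") (config.getD ((j + config.length - 1) % config.length) ""))]
  refine Finset.sum_congr rfl ?_
  intro k hk
  rw [pv_nx _ _ (List.mem_range.mp (by simpa using hk))]

-- the counting pass of B is the counter of the directed-adjacency multiset
theorem cnt_eq (config : List String) :
    (pvLp config).foldl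
      (fun d p =>
        let d := d.insert (p.1, p.2) (d.getD (p.1, p.2) 0 + 1)
        d.insert (p.2, p.1) (d.getD (p.2, p.1) 0 + 1))
      PySem.Dict.empty = PySem.Dict.counter (pvL config) := by
  rw [← PySem.Dict.foldl_insert_getD_add_one_eq_counter, pvL, List.foldl_flatMap]
  rfl

-- B as the sum over the distinct directed adjacencies, weighted by multiplicity
theorem B_norm (config : List String) (points : List (String × List (String × Int))) :
    getPointVal_alt config points =
      ((PySem.Set.ofList (pvL config)).map
        (fun k => edgeVal points k.1 k.2 * (List.count k (pvL config) : Int))).sum := by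
  unfold getPointVal_alt
  rw [pvLp_slice, cnt_eq]
  dsimp only
  rw [PySem.Dict.items_counter, List.foldl_map, PySem.List.foldl_add, zero_add]

-- List.count under the two (lawful) BEq instances on String × String
theorem count_beq_eq (x : String × String) (l : List (String × String)) :
    @List.count (String × String) instBEqOfDecidableEq x l = List.count x l := by
  induction l with
  | nil => rfl
  | cons b t ih => simp [List.count_cons, ih]

theorem getPointVal_eq (config : List String) (points : List (String × List (String × Int))) :
    getPointVal config points = getPointVal_alt config points := by
  rw [A_eq_S, B_norm, Finset.sum_list_map_count,
      ← List.sum_toFinset _ (PySem.Set.nodup_ofList (pvL config))]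
  rw [show (PySem.Set.ofList (pvL config)).toFinset = (pvL config).toFinset from by
      apply Finset.ext; intro x
      simp only [List.mem_toFinset]
      exact PySem.Set.mem_ofList (pvL config) x]
  refine Finset.sum_congr rfl fun x _ => ?_
  rw [nsmul_eq_mul, count_beq_eq, mul_comm]

-- ===== VERDICT (by name: the statements are the Claim_ definitions above) =====
theorem getPointVal_spec : Claim_equal_getPointVal := by
  intro config points _ _
  unfold Spec_getPointVal
  exact getPointVal_eq config points
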